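-- pv_equiv track=rewrite | github.com/ngleoikin/PACD | s3cdo_structure_learning.py | _has_directed_path
-- ===== SOURCE A (Python) =====
-- from typing import Dict, List, Optional, Set, Tuple
--
-- def _has_directed_path(src: int, dst: int, directed: Set[Tuple[int, int]]) -> bool:
--     stack = [src]
--     visited = set()
--     adj: Dict[int, Set[int]] = {}
--     for a, b in directed:
--         adj.setdefault(a, set()).add(b)
--     while stack:
--         cur = stack.pop()
--         if cur == dst:
--             return True
--         if cur in visited:
--             continue
--         visited.add(cur)
--         for nxt in adj.get(cur, ()):
--             if nxt not in visited:
--                 stack.append(nxt)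
--     return False
-- ===== SOURCE B (Python) =====
-- def _has_directed_path(src: int, dst: int, directed) -> bool:
--     # Fixed-point saturation: grow the set of nodes reachable from src by
--     # relaxing every edge until nothing changes, then test membership of dst.
--     reach = {src}
--     changed = True
--     while changed:
--         changed = False
--         for a, b in directed:
--             if a in reach and b not in reach:
--                 reach.add(b)
--                 changed = True
--     return dst in reach
-- ===== Notes on version B (the rewrite author's own statement) =====
-- stated objective: alternative
-- what changed: Replaces the adjacency-dict DFS with an explicit stack/visited set by a Bellman-Ford-style fixed-point saturation: repeatedly relax every edge to grow the reachable-from-src set until it stabilises, then test dst's membership.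
import Mathlib
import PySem

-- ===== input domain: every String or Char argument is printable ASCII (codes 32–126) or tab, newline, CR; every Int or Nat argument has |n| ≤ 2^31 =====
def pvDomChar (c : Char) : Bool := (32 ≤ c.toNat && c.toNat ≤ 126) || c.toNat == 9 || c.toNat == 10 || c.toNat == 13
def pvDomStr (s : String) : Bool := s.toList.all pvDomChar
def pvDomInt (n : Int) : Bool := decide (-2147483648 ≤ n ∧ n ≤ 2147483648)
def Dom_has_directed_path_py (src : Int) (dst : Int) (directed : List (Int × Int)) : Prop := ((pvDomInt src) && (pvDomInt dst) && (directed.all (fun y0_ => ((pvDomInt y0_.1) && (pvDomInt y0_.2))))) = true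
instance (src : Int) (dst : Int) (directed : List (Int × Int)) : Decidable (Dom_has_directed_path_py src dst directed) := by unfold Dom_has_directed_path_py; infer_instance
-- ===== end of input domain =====

-- B replaces A's explicit-stack DFS by fixed-point edge relaxation (saturation); objective: alternative algorithm, same return value.
-- Both programs only read `directed`; results do not depend on Python's set iteration order (pure reachability).

-- ===== PORT A =====
-- adj.setdefault(a, set()).add(b)  ==  adj[a] = adj.get(a, set()) ∪ {b}, key position preserved: Dict.modify
def pvBuildAdj (directed : List (Int × Int)) : PySem.Dict Int (PySem.Set Int) :=
  directed.foldl (fun adj p => adj.modify p.1 PySem.Set.empty (fun s => PySem.Set.add s p.2)) PySem.Dict.empty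

-- termination measure for A's while-loop: stack size + total out-degree of the not-yet-visited keys
def pvDegL (its : List (Int × PySem.Set Int)) (visited : PySem.Set Int) : Nat :=
  (its.map (fun kv => if kv.1 ∈ visited then 0 else kv.2.length)).sum

def pvDeg (adj : PySem.Dict Int (PySem.Set Int)) (visited : PySem.Set Int) : Nat :=
  pvDegL adj.items visited

theorem pvDegL_mono (its : List (Int × PySem.Set Int)) (visited : PySem.Set Int) (cur : Int) :
    pvDegL its (PySem.Set.add visited cur) ≤ pvDegL its visited := by
  induction its with
  | nil => simp [pvDegL]
  | cons kv its ih =>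
    simp only [pvDegL, List.map_cons, List.sum_cons] at *
    have h1 : (if kv.1 ∈ PySem.Set.add visited cur then 0 else kv.2.length)
        ≤ (if kv.1 ∈ visited then 0 else kv.2.length) := by
      by_cases h : kv.1 ∈ visited
      · simp [h, (PySem.Set.mem_add visited cur kv.1).mpr (Or.inl h)]
      · simp only [h, if_false]
        split <;> omega
    omega

theorem pvDeg_add (adj : PySem.Dict Int (PySem.Set Int)) (visited : PySem.Set Int) (cur : Int)
    (hcur : ¬ PySem.Set.contains visited cur = true) :
    pvDeg adj (PySem.Set.add visited cur) + (adj.getD cur PySem.Set.empty).length ≤ pvDeg adj visited := by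
  have hcur' : cur ∉ visited := fun h => hcur ((PySem.Set.contains_iff visited cur).mpr h)
  have hcc : cur ∈ PySem.Set.add visited cur := (PySem.Set.mem_add visited cur cur).mpr (Or.inr rfl)
  obtain ⟨its⟩ := adj
  induction its with
  | nil =>
    simp [pvDeg, pvDegL, PySem.Dict.getD_eq_get?_getD, PySem.Dict.get?, PySem.Set.empty]
  | cons kv its ih =>
    obtain ⟨k, v⟩ := kv
    by_cases hk : k = cur
    · -- head term drops by exactly its length; tail shrinks monotonically
      have hmono := pvDegL_mono its visited cur
      simp only [pvDeg, pvDegL, List.map_cons, List.sum_cons,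
        PySem.Dict.getD_eq_get?_getD, PySem.Dict.get?_mk_cons] at *
      simp only [hk, beq_self_eq_true, if_pos hcc, if_neg hcur', if_true, Option.getD_some]
      omega
    · have htail := ih
      have hne : (k == cur) = false := by simp [hk]
      simp only [pvDeg, pvDegL, List.map_cons, List.sum_cons,
        PySem.Dict.getD_eq_get?_getD, PySem.Dict.get?_mk_cons, hne,
        Bool.false_eq_true, if_false] at *
      have hsame : (k ∈ PySem.Set.add visited cur) ↔ k ∈ visited := by
        rw [PySem.Set.mem_add]
        exact ⟨fun h => h.resolve_right hk, Or.inl⟩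
      by_cases hm : k ∈ visited
      · rw [if_pos hm, if_pos (hsame.mpr hm)]; omega
      · rw [if_neg hm, if_neg (fun h => hm (hsame.mp h))]; omega

def pvPush (v' : PySem.Set Int) (ns : List Int) (st : List Int) : List Int :=
  ns.foldl (fun st nxt => if PySem.Set.contains v' nxt then st else nxt :: st) st

theorem pvPushLen (v' : PySem.Set Int) (ns : List Int) :
    ∀ st : List Int, (pvPush v' ns st).length ≤ st.length + ns.length := by
  unfold pvPush
  induction ns with
  | nil => intro st; simp
  | cons n ns ih =>
    intro st
    simp only [List.foldl_cons]
    split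
    · have := ih st; simp at *; omega
    · have := ih (n :: st); simp at *; omega

-- Python's stack is modelled head-as-top (append/pop() at the end = cons/uncons at the head: same LIFO order).
def pvLoopA (dst : Int) (adj : PySem.Dict Int (PySem.Set Int)) :
    List Int → PySem.Set Int → Bool
  | [], _ => false
  | cur :: rest, visited =>
    if cur = dst then true
    else if hv : PySem.Set.contains visited cur then pvLoopA dst adj rest visited
    else
      pvLoopA dst adj
        (pvPush (PySem.Set.add visited cur) (adj.getD cur PySem.Set.empty) rest)
        (PySem.Set.add visited cur)
termination_by stack visited => stack.length + pvDeg adj visited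
decreasing_by
  · simp only [List.length_cons]; omega
  · have h1 := pvPushLen (PySem.Set.add visited cur) (adj.getD cur PySem.Set.empty) rest
    have h2 := pvDeg_add adj visited cur hv
    simp only [List.length_cons]
    omega

def has_directed_path_py (src : Int) (dst : Int) (directed : List (Int × Int)) : Bool :=
  pvLoopA dst (pvBuildAdj directed) [src] PySem.Set.empty

-- ===== PORT B =====
-- one pass of `for a, b in directed`, threading (reach, changed)
def pvPass (directed : List (Int × Int)) (reach : PySem.Set Int) : PySem.Set Int × Bool :=
  directed.foldl
    (fun (st : PySem.Set Int × Bool) p =>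
      if PySem.Set.contains st.1 p.1 && !(PySem.Set.contains st.1 p.2)
      then (PySem.Set.add st.1 p.2, true) else st)
    (reach, false)

theorem pvPass_grow_aux (l : List (Int × Int)) :
    ∀ (st : PySem.Set Int × Bool) (x : Int), x ∈ st.1 →
      x ∈ (l.foldl
        (fun (st : PySem.Set Int × Bool) p =>
          if PySem.Set.contains st.1 p.1 && !(PySem.Set.contains st.1 p.2)
          then (PySem.Set.add st.1 p.2, true) else st) st).1 := by
  induction l with
  | nil => intro st x hx; exact hx
  | cons p l ih =>
    intro st x hx
    simp only [List.foldl_cons]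
    split
    · exact ih _ x ((PySem.Set.mem_add st.1 p.2 x).mpr (Or.inl hx))
    · exact ih _ x hx

theorem pvPass_flag_aux (l : List (Int × Int)) :
    ∀ (st : PySem.Set Int × Bool),
      (l.foldl
        (fun (st : PySem.Set Int × Bool) p =>
          if PySem.Set.contains st.1 p.1 && !(PySem.Set.contains st.1 p.2)
          then (PySem.Set.add st.1 p.2, true) else st) st).2 = true →
      st.2 = true ∨ ∃ p ∈ l, p.2 ∉ st.1 ∧ p.2 ∈ (l.foldl
        (fun (st : PySem.Set Int × Bool) p =>
          if PySem.Set.contains st.1 p.1 && !(PySem.Set.contains st.1 p.2)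
          then (PySem.Set.add st.1 p.2, true) else st) st).1 := by
  induction l with
  | nil => intro st h; exact Or.inl h
  | cons p l ih =>
    intro st h
    simp only [List.foldl_cons] at h ⊢
    split at h
    · rename_i hcond
      right
      refine ⟨p, List.mem_cons_self, ?_, ?_⟩
      · simp only [Bool.and_eq_true, Bool.not_eq_true'] at hcond
        exact fun hm => absurd ((PySem.Set.contains_iff st.1 p.2).mpr hm)
          (by rw [hcond.2]; decide)
      · rw [if_pos (by simpa using hcond)]
        exact pvPass_grow_aux l _ p.2 ((PySem.Set.mem_add st.1 p.2 p.2).mpr (Or.inr rfl))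
    · rename_i hcond
      rcases ih _ h with hflag | ⟨q, hq, hq2, hq3⟩
      · exact Or.inl hflag
      · right
        refine ⟨q, List.mem_cons_of_mem _ hq, hq2, ?_⟩
        rw [if_neg hcond]
        exact hq3

theorem pvFilterLenMono (q p : Int × Int → Bool) :
    ∀ l : List (Int × Int), (∀ x ∈ l, q x = true → p x = true) →
      (l.filter q).length ≤ (l.filter p).length := by
  intro l
  induction l with
  | nil => simp
  | cons a l ih =>
    intro hmono
    have ha := hmono a (by simp)
    have hl := ih (fun x hx => hmono x (by simp [hx]))
    by_cases hqa : q a = true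
    · simp only [List.filter_cons, hqa, ha hqa, if_pos, List.length_cons]; omega
    · simp only [List.filter_cons, hqa, Bool.false_eq_true, if_false]
      by_cases hpa : p a = true
      · simp only [hpa, if_pos, List.length_cons]; omega
      · simp only [hpa, Bool.false_eq_true, if_false]; omega

theorem pvFilterStrict (q p : Int × Int → Bool) (e : Int × Int)
    (hep : p e = true) (heq : q e = false) :
    ∀ l : List (Int × Int), (∀ x ∈ l, q x = true → p x = true) → e ∈ l →
      (l.filter q).length < (l.filter p).length := by
  intro l
  induction l with
  | nil => intro _ he; cases he
  | cons a l ih =>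
    intro hmono he
    have hl := pvFilterLenMono q p l (fun x hx => hmono x (List.mem_cons_of_mem _ hx))
    rcases List.mem_cons.mp he with rfl | he'
    · simp only [List.filter_cons, hep, heq, if_pos, Bool.false_eq_true, if_false,
        List.length_cons]
      omega
    · have hstep := ih (fun x hx => hmono x (List.mem_cons_of_mem _ hx)) he'
      by_cases hqa : q a = true
      · simp only [List.filter_cons, hqa, hmono a (by simp) hqa, if_pos, List.length_cons]
        omega
      · simp only [List.filter_cons, hqa, Bool.false_eq_true, if_false]
        by_cases hpa : p a = true
        · simp only [hpa, if_pos, List.length_cons]; omega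
        · simp only [hpa, Bool.false_eq_true, if_false]; omega

def pvLoopB (directed : List (Int × Int)) (reach : PySem.Set Int) : PySem.Set Int :=
  let st := pvPass directed reach
  if h : st.2 then pvLoopB directed st.1 else st.1
termination_by (directed.filter (fun p => !(PySem.Set.contains reach p.2))).length
decreasing_by
  rcases pvPass_flag_aux directed (reach, false) h with hfl | ⟨e, he, he2, he3⟩
  · simp at hfl
  · apply pvFilterStrict _ _ e ?_ ?_ directed ?_ he
    · have hc : PySem.Set.contains reach e.2 = false := by
        rw [Bool.eq_false_iff, Ne, PySem.Set.contains_iff]; exact he2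
      simp only [hc]; rfl
    · have hc : PySem.Set.contains (pvPass directed reach).1 e.2 = true :=
        (PySem.Set.contains_iff _ _).mpr he3
      simp only [hc]; rfl
    · intro x _ hx
      simp only [Bool.not_eq_eq_eq_not, Bool.not_true, Bool.eq_false_iff, Ne,
        PySem.Set.contains_iff] at hx ⊢
      exact fun hm => hx (pvPass_grow_aux directed (reach, false) x.2 hm)

def has_directed_path_py_alt (src : Int) (dst : Int) (directed : List (Int × Int)) : Bool :=
  PySem.Set.contains (pvLoopB directed (PySem.Set.ofList [src])) dst

-- ===== PRECONDITION & SPEC =====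
def Spec_has_directed_path_py (src : Int) (dst : Int) (directed : List (Int × Int)) (out : Bool) : Prop := out = has_directed_path_py_alt src dst directed
instance (src : Int) (dst : Int) (directed : List (Int × Int)) (out : Bool) : Decidable (Spec_has_directed_path_py src dst directed out) := by unfold Spec_has_directed_path_py; infer_instance

-- ===== CLAIM (what is proved, stated in full; the proofs are below) =====
def Claim_equal_has_directed_path_py : Prop := ∀ (src : Int) (dst : Int) (directed : List (Int × Int)), Dom_has_directed_path_py src dst directed → Spec_has_directed_path_py src dst directed (has_directed_path_py src dst directed)

-- ===== LEMMAS AND PROOFS =====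

-- the edge relation read off the adjacency dict, and reachability
def pvRadj (adj : PySem.Dict Int (PySem.Set Int)) (x y : Int) : Prop :=
  y ∈ adj.getD x PySem.Set.empty

theorem pvRTG_iff {r s : Int → Int → Prop} (h : ∀ a b, r a b ↔ s a b) (x y : Int) :
    Relation.ReflTransGen r x y ↔ Relation.ReflTransGen s x y :=
  ⟨Relation.ReflTransGen.mono (fun a b => (h a b).mp),
   Relation.ReflTransGen.mono (fun a b => (h a b).mpr)⟩

theorem pvClosed {r : Int → Int → Prop} (S : Int → Prop)
    (hcl : ∀ a b, S a → r a b → S b) (x y : Int) (hx : S x)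
    (h : Relation.ReflTransGen r x y) : S y := by
  induction h with
  | refl => exact hx
  | tail _ hr ih => exact hcl _ _ ih hr

theorem pvPush_subset (v' : PySem.Set Int) (ns : List Int) :
    ∀ st : List Int, ∀ x ∈ st, x ∈ pvPush v' ns st := by
  induction ns with
  | nil => intro st x hx; exact hx
  | cons n ns ih =>
    intro st x hx
    simp only [pvPush, List.foldl_cons]
    split
    · exact ih st x hx
    · exact ih (n :: st) x (List.mem_cons_of_mem _ hx)

theorem pvPush_mem (v' : PySem.Set Int) (ns : List Int) :
    ∀ st : List Int, ∀ w ∈ ns, ¬ PySem.Set.contains v' w = true → w ∈ pvPush v' ns st := by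
  induction ns with
  | nil => intro st w hw; cases hw
  | cons n ns ih =>
    intro st w hw hnc
    simp only [pvPush, List.foldl_cons]
    rcases List.mem_cons.mp hw with rfl | hw'
    · rw [if_neg hnc]
      exact pvPush_subset v' ns (w :: st) w (by simp)
    · split
      · exact ih st w hw' hnc
      · exact ih (n :: st) w hw' hnc

theorem pvPush_cases (v' : PySem.Set Int) (ns : List Int) :
    ∀ st : List Int, ∀ x ∈ pvPush v' ns st, x ∈ st ∨ x ∈ ns := by
  induction ns with
  | nil => intro st x hx; exact Or.inl hx
  | cons n ns ih =>
    intro st x hx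
    simp only [pvPush, List.foldl_cons] at hx
    split at hx
    · rcases ih _ x hx with h | h
      · exact Or.inl h
      · exact Or.inr (List.mem_cons_of_mem _ h)
    · rcases ih _ x hx with h | h
      · rcases List.mem_cons.mp h with rfl | h'
        · exact Or.inr (by simp)
        · exact Or.inl h'
      · exact Or.inr (List.mem_cons_of_mem _ h)

theorem pvAdj_mem_aux (l : List (Int × Int)) :
    ∀ (d : PySem.Dict Int (PySem.Set Int)) (a y : Int),
      y ∈ (l.foldl (fun adj p => adj.modify p.1 PySem.Set.empty (fun s => PySem.Set.add s p.2)) d).getD a PySem.Set.empty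
        ↔ y ∈ d.getD a PySem.Set.empty ∨ (a, y) ∈ l := by
  induction l with
  | nil => simp
  | cons p l ih =>
    intro d a y
    simp only [List.foldl_cons]
    rw [ih, PySem.Dict.getD_modify, List.mem_cons, Prod.ext_iff]
    by_cases ha : a = p.1
    · rw [if_pos ha, PySem.Set.mem_add, ha]
      tauto
    · rw [if_neg ha]
      constructor
      · rintro (h | h)
        · exact Or.inl h
        · exact Or.inr (Or.inr h)
      · rintro (h | ⟨h1, h2⟩ | h)
        · exact Or.inl h
        · exact absurd h1 ha
        · exact Or.inr h

theorem pvBuildAdj_mem (directed : List (Int × Int)) (a y : Int) :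
    pvRadj (pvBuildAdj directed) a y ↔ (a, y) ∈ directed := by
  unfold pvRadj pvBuildAdj
  rw [pvAdj_mem_aux]
  simp [PySem.Dict.getD_empty, PySem.Set.empty]

theorem pvLoopA_true (dst : Int) (adj : PySem.Dict Int (PySem.Set Int))
    (stack : List Int) (visited : PySem.Set Int) :
    pvLoopA dst adj stack visited = true →
    ∃ x ∈ stack, Relation.ReflTransGen (pvRadj adj) x dst := by
  induction stack, visited using pvLoopA.induct dst adj with
  | case1 visited => intro h; rw [pvLoopA] at h; cases h
  | case2 rest visited =>
    intro _
    exact ⟨dst, by simp, Relation.ReflTransGen.refl⟩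
  | case3 cur rest visited hd hv ih =>
    intro h
    rw [pvLoopA, if_neg hd, dif_pos hv] at h
    obtain ⟨x, hx, hr⟩ := ih h
    exact ⟨x, List.mem_cons_of_mem _ hx, hr⟩
  | case4 cur rest visited hd hv ih =>
    intro h
    rw [pvLoopA, if_neg hd, dif_neg hv] at h
    obtain ⟨x, hx, hr⟩ := ih h
    rcases pvPush_cases _ _ _ x hx with h' | h'
    · exact ⟨x, List.mem_cons_of_mem _ h', hr⟩
    · exact ⟨cur, by simp, Relation.ReflTransGen.head h' hr⟩

theorem pvLoopA_false (dst : Int) (adj : PySem.Dict Int (PySem.Set Int))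
    (stack : List Int) (visited : PySem.Set Int) :
    pvLoopA dst adj stack visited = false →
    (∀ v ∈ visited, ∀ w, pvRadj adj v w → w ∈ visited ∨ w ∈ stack) →
    dst ∉ visited →
    ∀ x, (x ∈ stack ∨ x ∈ visited) → ¬ Relation.ReflTransGen (pvRadj adj) x dst := by
  induction stack, visited using pvLoopA.induct dst adj with
  | case1 visited =>
    intro _ hinv hdst x hx hreach
    rcases hx with hx | hx
    · cases hx
    · have hcl : ∀ a b, a ∈ visited → pvRadj adj a b → b ∈ visited := by
        intro a b ha hr
        rcases hinv a ha b hr with h | h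
        · exact h
        · cases h
      exact hdst (pvClosed (· ∈ visited) hcl x dst hx hreach)
  | case2 rest visited =>
    intro h
    rw [pvLoopA, if_pos rfl] at h
    cases h
  | case3 cur rest visited hd hv ih =>
    intro h hinv hdst x hx hreach
    rw [pvLoopA, if_neg hd, dif_pos hv] at h
    have hcurv : cur ∈ visited := (PySem.Set.contains_iff visited cur).mp hv
    have hinv' : ∀ v ∈ visited, ∀ w, pvRadj adj v w → w ∈ visited ∨ w ∈ rest := by
      intro v hvv w hr
      rcases hinv v hvv w hr with hw | hw
      · exact Or.inl hw
      · rcases List.mem_cons.mp hw with rfl | hw'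
        · exact Or.inl hcurv
        · exact Or.inr hw'
    refine ih h hinv' hdst x ?_ hreach
    rcases hx with hx | hx
    · rcases List.mem_cons.mp hx with rfl | hx'
      · exact Or.inr hcurv
      · exact Or.inl hx'
    · exact Or.inr hx
  | case4 cur rest visited hd hv ih =>
    intro h hinv hdst x hx hreach
    rw [pvLoopA, if_neg hd, dif_neg hv] at h
    have hinv' : ∀ v ∈ PySem.Set.add visited cur, ∀ w, pvRadj adj v w →
        w ∈ PySem.Set.add visited cur ∨
          w ∈ pvPush (PySem.Set.add visited cur) (adj.getD cur PySem.Set.empty) rest := by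
      intro v hvv w hr
      rcases (PySem.Set.mem_add visited cur v).mp hvv with hvv' | rfl
      · rcases hinv v hvv' w hr with hw | hw
        · exact Or.inl ((PySem.Set.mem_add visited cur w).mpr (Or.inl hw))
        · rcases List.mem_cons.mp hw with rfl | hw'
          · exact Or.inl ((PySem.Set.mem_add visited w w).mpr (Or.inr rfl))
          · exact Or.inr (pvPush_subset _ _ rest w hw')
      · by_cases hw : w ∈ PySem.Set.add visited v
        · exact Or.inl hw
        · refine Or.inr (pvPush_mem _ _ rest w hr ?_)
          intro hc
          exact hw ((PySem.Set.contains_iff _ _).mp hc)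
    have hdst' : dst ∉ PySem.Set.add visited cur := by
      intro hc
      rcases (PySem.Set.mem_add visited cur dst).mp hc with hc' | hc'
      · exact hdst hc'
      · exact hd hc'.symm
    refine ih h hinv' hdst' x ?_ hreach
    rcases hx with hx | hx
    · rcases List.mem_cons.mp hx with rfl | hx'
      · exact Or.inr ((PySem.Set.mem_add visited x x).mpr (Or.inr rfl))
      · exact Or.inl (pvPush_subset _ _ rest x hx')
    · exact Or.inr ((PySem.Set.mem_add visited cur x).mpr (Or.inl hx))

theorem pvA_iff (src dst : Int) (directed : List (Int × Int)) :
    has_directed_path_py src dst directed = true ↔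
      Relation.ReflTransGen (fun a b => (a, b) ∈ directed) src dst := by
  have hiff := pvRTG_iff (fun a b => pvBuildAdj_mem directed a b) src dst
  unfold has_directed_path_py
  constructor
  · intro h
    obtain ⟨x, hx, hr⟩ := pvLoopA_true dst (pvBuildAdj directed) [src] PySem.Set.empty h
    rcases List.mem_singleton.mp hx with rfl
    exact hiff.mp hr
  · intro h
    by_contra hA
    rw [Bool.not_eq_true] at hA
    exact pvLoopA_false dst (pvBuildAdj directed) [src] PySem.Set.empty hA
      (by intro v hv; cases hv) (by intro hc; cases hc)
      src (Or.inl (by simp)) (hiff.mpr h)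

-- B side: one relaxation pass
theorem pvPass_flagmono (l : List (Int × Int)) :
    ∀ st : PySem.Set Int × Bool, st.2 = true →
      (l.foldl
        (fun (st : PySem.Set Int × Bool) p =>
          if PySem.Set.contains st.1 p.1 && !(PySem.Set.contains st.1 p.2)
          then (PySem.Set.add st.1 p.2, true) else st) st).2 = true := by
  induction l with
  | nil => intro st h; exact h
  | cons p l ih =>
    intro st h
    simp only [List.foldl_cons]
    split
    · exact ih _ rfl
    · exact ih _ h

theorem pvPass_sound_aux (directed : List (Int × Int)) (src : Int) (l : List (Int × Int)) :
    ∀ st : PySem.Set Int × Bool, (∀ p ∈ l, p ∈ directed) →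
      (∀ x ∈ st.1, Relation.ReflTransGen (fun a b => (a, b) ∈ directed) src x) →
      ∀ x ∈ (l.foldl
        (fun (st : PySem.Set Int × Bool) p =>
          if PySem.Set.contains st.1 p.1 && !(PySem.Set.contains st.1 p.2)
          then (PySem.Set.add st.1 p.2, true) else st) st).1,
        Relation.ReflTransGen (fun a b => (a, b) ∈ directed) src x := by
  induction l with
  | nil => intro st _ h0 x hx; exact h0 x hx
  | cons p l ih =>
    intro st hl h0 x hx
    simp only [List.foldl_cons] at hx
    split at hx
    · rename_i hcond
      refine ih _ (fun q hq => hl q (List.mem_cons_of_mem _ hq)) ?_ x hx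
      intro y hy
      rcases (PySem.Set.mem_add st.1 p.2 y).mp hy with hy' | hy2
      · exact h0 y hy'
      · simp only [Bool.and_eq_true] at hcond
        have hp1 : p.1 ∈ st.1 := (PySem.Set.contains_iff st.1 p.1).mp hcond.1
        have hedge : (p.1, p.2) ∈ directed := by
          have hp : p ∈ directed := hl p (by simp)
          simpa using hp
        exact hy2 ▸ Relation.ReflTransGen.tail (h0 p.1 hp1) hedge
    · exact ih _ (fun q hq => hl q (List.mem_cons_of_mem _ hq)) h0 x hx

theorem pvPass_fix_aux (l : List (Int × Int)) :
    ∀ st : PySem.Set Int × Bool,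
      (l.foldl
        (fun (st : PySem.Set Int × Bool) p =>
          if PySem.Set.contains st.1 p.1 && !(PySem.Set.contains st.1 p.2)
          then (PySem.Set.add st.1 p.2, true) else st) st).2 = false →
      (l.foldl
        (fun (st : PySem.Set Int × Bool) p =>
          if PySem.Set.contains st.1 p.1 && !(PySem.Set.contains st.1 p.2)
          then (PySem.Set.add st.1 p.2, true) else st) st).1 = st.1 ∧
      ∀ p ∈ l, p.1 ∈ st.1 → p.2 ∈ st.1 := by
  induction l with
  | nil => intro st _; exact ⟨rfl, by simp⟩
  | cons p l ih =>
    intro st h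
    simp only [List.foldl_cons] at h ⊢
    by_cases hcond : (PySem.Set.contains st.1 p.1 && !(PySem.Set.contains st.1 p.2)) = true
    · rw [if_pos hcond] at h
      rw [pvPass_flagmono l _ rfl] at h
      cases h
    · rw [if_neg hcond] at h ⊢
      obtain ⟨h1, h2⟩ := ih st h
      refine ⟨h1, ?_⟩
      intro q hq hq1
      rcases List.mem_cons.mp hq with rfl | hq'
      · by_contra hq2
        apply hcond

        rw [(PySem.Set.contains_iff st.1 q.1).mpr hq1]
        rw [Bool.eq_false_iff.mpr (fun hc => hq2 ((PySem.Set.contains_iff st.1 q.2).mp hc))]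
        rfl
      · exact h2 q hq' hq1

theorem pvLoopB_eq_true (directed : List (Int × Int)) (reach : PySem.Set Int)
    (h : (pvPass directed reach).2 = true) :
    pvLoopB directed reach = pvLoopB directed (pvPass directed reach).1 := by
  rw [pvLoopB]; simp [h]

theorem pvLoopB_eq_false (directed : List (Int × Int)) (reach : PySem.Set Int)
    (h : (pvPass directed reach).2 = false) :
    pvLoopB directed reach = (pvPass directed reach).1 := by
  rw [pvLoopB]; simp [h]

theorem pvLoopB_sound (directed : List (Int × Int)) (src : Int) (reach : PySem.Set Int) :
    (∀ x ∈ reach, Relation.ReflTransGen (fun a b => (a, b) ∈ directed) src x) →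
    ∀ x ∈ pvLoopB directed reach,
      Relation.ReflTransGen (fun a b => (a, b) ∈ directed) src x := by
  induction reach using pvLoopB.induct directed with
  | case1 reach st h ih =>
    intro h0 x hx
    have h' : (pvPass directed reach).2 = true := h
    have ih' : (∀ x ∈ (pvPass directed reach).1,
        Relation.ReflTransGen (fun a b => (a, b) ∈ directed) src x) →
        ∀ x ∈ pvLoopB directed (pvPass directed reach).1,
        Relation.ReflTransGen (fun a b => (a, b) ∈ directed) src x := ih
    rw [pvLoopB_eq_true directed reach h'] at hx
    exact ih' (pvPass_sound_aux directed src directed (reach, false) (fun p hp => hp) h0) x hx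
  | case2 reach st h =>
    intro h0 x hx
    have h' : (pvPass directed reach).2 = false := by
      have h'' : ¬ (pvPass directed reach).2 = true := h
      simpa using h''
    rw [pvLoopB_eq_false directed reach h'] at hx
    exact pvPass_sound_aux directed src directed (reach, false) (fun p hp => hp) h0 x hx

theorem pvLoopB_subset (directed : List (Int × Int)) (reach : PySem.Set Int) :
    ∀ x ∈ reach, x ∈ pvLoopB directed reach := by
  induction reach using pvLoopB.induct directed with
  | case1 reach st h ih =>
    intro x hx
    have h' : (pvPass directed reach).2 = true := h
    have ih' : ∀ x ∈ (pvPass directed reach).1, x ∈ pvLoopB directed (pvPass directed reach).1 := ih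
    rw [pvLoopB_eq_true directed reach h']
    exact ih' x (pvPass_grow_aux directed (reach, false) x hx)
  | case2 reach st h =>
    intro x hx
    have h' : (pvPass directed reach).2 = false := by
      have h'' : ¬ (pvPass directed reach).2 = true := h
      simpa using h''
    rw [pvLoopB_eq_false directed reach h']
    exact pvPass_grow_aux directed (reach, false) x hx

theorem pvLoopB_closed (directed : List (Int × Int)) (reach : PySem.Set Int) :
    ∀ p ∈ directed, p.1 ∈ pvLoopB directed reach → p.2 ∈ pvLoopB directed reach := by
  induction reach using pvLoopB.induct directed with
  | case1 reach st h ih =>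
    intro p hp h1
    have h' : (pvPass directed reach).2 = true := h
    have ih' : ∀ p ∈ directed, p.1 ∈ pvLoopB directed (pvPass directed reach).1 →
        p.2 ∈ pvLoopB directed (pvPass directed reach).1 := ih
    rw [pvLoopB_eq_true directed reach h'] at h1 ⊢
    exact ih' p hp h1
  | case2 reach st h =>
    intro p hp h1
    have h' : (pvPass directed reach).2 = false := by
      have h'' : ¬ (pvPass directed reach).2 = true := h
      simpa using h''
    have hfix := pvPass_fix_aux directed (reach, false) h'
    have hr : (pvPass directed reach).1 = reach := hfix.1
    have hcl : ∀ p ∈ directed, p.1 ∈ reach → p.2 ∈ reach := hfix.2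
    rw [pvLoopB_eq_false directed reach h'] at h1 ⊢
    rw [hr] at h1 ⊢
    exact hcl p hp h1

theorem pvB_iff (src dst : Int) (directed : List (Int × Int)) :
    has_directed_path_py_alt src dst directed = true ↔
      Relation.ReflTransGen (fun a b => (a, b) ∈ directed) src dst := by
  unfold has_directed_path_py_alt
  rw [PySem.Set.contains_iff]
  constructor
  · intro h
    refine pvLoopB_sound directed src (PySem.Set.ofList [src]) ?_ dst h
    intro x hx
    rcases List.mem_singleton.mp ((PySem.Set.mem_ofList [src] x).mp hx) with rfl
    exact Relation.ReflTransGen.refl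
  · intro h
    refine pvClosed (· ∈ pvLoopB directed (PySem.Set.ofList [src])) ?_ src dst ?_ h
    · intro a b ha hab
      exact pvLoopB_closed directed (PySem.Set.ofList [src]) (a, b) hab ha
    · exact pvLoopB_subset directed (PySem.Set.ofList [src]) src
        ((PySem.Set.mem_ofList [src] src).mpr (by simp))

-- ===== VERDICT (by name: the statement is the Claim_ definition above) =====
theorem has_directed_path_py_spec : Claim_equal_has_directed_path_py := by
  intro src dst directed _
  unfold Spec_has_directed_path_py
  rw [Bool.eq_iff_iff, pvA_iff, pvB_iff]
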